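-- pv_equiv track=rewrite | github.com/DongYun666/leetcode | 面试题 16.21. 交换和.py | findSwapValues
-- ===== SOURCE A (Python) =====
-- from collections import Counter
-- from typing import List
--
-- def findSwapValues(array1: List[int], array2: List[int]) -> List[int]:
--     array1.sort()
--     array2.sort()
--     sum_1 = sum(array1)
--     sum_2 = sum(array2)
--     cnt = Counter(array2)
--     diff = sum_1 - sum_2
--     if diff % 2 != 0:
--         return []
--     else:
--         diff //= 2
--     for num in array1:
--         if num-diff in cnt.keys():
--             return [num,num-diff]
--     return []
-- ===== SOURCE B (Python) =====
-- def findSwapValues(array1, array2):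
--     diff = sum(array1) - sum(array2)
--     if diff % 2 != 0:
--         return []
--     diff //= 2
--     s2 = set(array2)
--     best = None
--     for num in array1:
--         if num - diff in s2:
--             if best is None or num < best:
--                 best = num
--     if best is None:
--         return []
--     return [best, best - diff]
-- ===== Notes on version B (the rewrite author's own statement) =====
-- stated objective: faster
-- what changed: Instead of sorting both arrays and scanning the sorted array1 for the first match in a Counter, B builds a hash set of array2 once and makes a single unsorted pass over array1 tracking the minimum qualifying element (the first match of sorted array1 is exactly the minimum), and B does not mutate its arguments.
import Mathlib
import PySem

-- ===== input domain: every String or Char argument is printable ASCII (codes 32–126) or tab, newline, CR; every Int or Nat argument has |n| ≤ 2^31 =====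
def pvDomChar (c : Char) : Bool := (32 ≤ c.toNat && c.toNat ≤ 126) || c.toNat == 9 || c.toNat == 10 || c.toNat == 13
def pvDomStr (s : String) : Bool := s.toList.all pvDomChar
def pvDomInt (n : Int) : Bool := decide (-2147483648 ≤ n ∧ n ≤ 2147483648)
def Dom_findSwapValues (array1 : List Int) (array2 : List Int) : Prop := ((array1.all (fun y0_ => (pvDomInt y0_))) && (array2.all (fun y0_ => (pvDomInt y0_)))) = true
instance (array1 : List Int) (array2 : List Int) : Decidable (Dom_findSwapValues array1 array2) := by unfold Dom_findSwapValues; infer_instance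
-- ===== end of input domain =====

-- B replaces A's sort-both-arrays-then-scan with a hash set of array2 and a single
-- unsorted min-tracking pass over array1 (return value only: A sorts its arguments in place, B does not mutate them).

-- ===== PORT A =====
-- the 'for num in array1: if num-diff in cnt.keys(): return [num, num-diff]' loop
def findLoopA (cnt : PySem.Dict Int Int) (diff : Int) : List Int → List Int
  | [] => []
  | num :: rest =>
      if cnt.contains (num - diff) then [num, num - diff] else findLoopA cnt diff rest

def findSwapValues (array1 : List Int) (array2 : List Int) : List Int :=
  let a1 := PySem.List.sorted array1 (fun x => x) false
  let a2 := PySem.List.sorted array2 (fun x => x) false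
  let sum_1 := a1.foldl (· + ·) 0
  let sum_2 := a2.foldl (· + ·) 0
  let cnt := PySem.Dict.counter a2
  let diff := sum_1 - sum_2
  if PySem.Int.mod diff 2 ≠ 0 then []
  else
    let diff2 := PySem.Int.floordiv diff 2
    findLoopA cnt diff2 a1

-- ===== PORT B =====
def findSwapValues_alt (array1 : List Int) (array2 : List Int) : List Int :=
  let diff := array1.foldl (· + ·) 0 - array2.foldl (· + ·) 0
  if PySem.Int.mod diff 2 ≠ 0 then []
  else
    let d := PySem.Int.floordiv diff 2
    let s2 := PySem.Set.ofList array2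
    let best := array1.foldl (fun best num =>
      if PySem.Set.contains s2 (num - d) then
        match best with
        | none => some num
        | some m => if num < m then some num else best
      else best) none
    match best with
    | none => []
    | some m => [m, m - d]

-- ===== PRECONDITION & SPEC =====
def Spec_findSwapValues (array1 : List Int) (array2 : List Int) (out : List Int) : Prop := out = findSwapValues_alt array1 array2
instance (array1 : List Int) (array2 : List Int) (out : List Int) : Decidable (Spec_findSwapValues array1 array2 out) := by unfold Spec_findSwapValues; infer_instance

-- ===== CLAIM (what is proved, stated in full; the proofs are below) =====
def Claim_equal_findSwapValues : Prop := ∀ (array1 : List Int) (array2 : List Int), Dom_findSwapValues array1 array2 → Spec_findSwapValues array1 array2 (findSwapValues array1 array2)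

-- ===== LEMMAS AND PROOFS =====

theorem findLoopA_eq (cnt : PySem.Dict Int Int) (d : Int) (l : List Int) :
    findLoopA cnt d l = (match l.find? (fun x => cnt.contains (x - d)) with
      | none => []
      | some m => [m, m - d]) := by
  induction l with
  | nil => rfl
  | cons x t ih =>
    rw [findLoopA, List.find?_cons]
    by_cases hx : cnt.contains (x - d) = true
    · simp [hx]
    · simp only [Bool.not_eq_true] at hx
      simp [hx, ih]

theorem find?_sorted_min (p : Int → Bool) (l : List Int) (m : Int)
    (hp : List.Pairwise (· ≤ ·) l) (h : l.find? p = some m) :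
    p m = true ∧ m ∈ l ∧ ∀ y ∈ l, p y = true → m ≤ y := by
  induction l with
  | nil => simp at h
  | cons x t ih =>
    rw [List.find?_cons] at h
    by_cases hx : p x = true
    · simp [hx] at h
      subst h
      refine ⟨hx, List.mem_cons_self, ?_⟩
      intro y hy _
      rcases List.mem_cons.mp hy with rfl | hyt
      · exact le_refl _
      · exact (List.pairwise_cons.mp hp).1 y hyt
    · simp only [Bool.not_eq_true] at hx
      simp [hx] at h
      obtain ⟨h1, h2, h3⟩ := ih (List.pairwise_cons.mp hp).2 h
      refine ⟨h1, List.mem_cons_of_mem _ h2, ?_⟩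
      intro y hy hpy
      rcases List.mem_cons.mp hy with rfl | hyt
      · exact absurd hpy (by simp [hx])
      · exact h3 y hyt hpy

-- the min-tracking accumulator step, with the membership test abstracted as p
theorem stepB_eq (p : Int → Bool) (b : Option Int) (num : Int) :
    (if p num then (match b with
        | none => some num
        | some m => if num < m then some num else b)
      else b)
    = (if p num then some (match b with | none => num | some m => min m num) else b) := by
  by_cases hp : p num = true
  · simp only [hp, if_true]
    cases b with
    | none => rfl
    | some m =>
      by_cases h : num < m
      · simp [h, min_eq_right (le_of_lt h)]
      · simp [h, min_eq_left (not_lt.mp h)]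
  · simp [hp]

theorem gfold_some (t : List Int) : ∀ m0 : Int,
    t.foldl (fun (b : Option Int) (x : Int) =>
      some (match b with | none => x | some m => min m x)) (some m0)
    = some (t.foldl min m0) := by
  induction t with
  | nil => intro m0; rfl
  | cons x t ih => intro m0; simpa using ih (min m0 x)

theorem foldB_eq_min? (p : Int → Bool) (l : List Int) :
    l.foldl (fun best num =>
      if p num then (match best with
        | none => some num
        | some m => if num < m then some num else best)
      else best) none
    = PySem.List.min? (l.filter p) (fun y => y) := by
  have hstep : (fun (best : Option Int) (num : Int) =>
      if p num then (match best with
        | none => some num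
        | some m => if num < m then some num else best)
      else best)
      = fun best num => if p num then
          some (match best with | none => num | some m => min m num) else best := by
    funext b num; exact stepB_eq p b num
  rw [hstep, ← List.foldl_filter]
  cases hf : l.filter p with
  | nil => rfl
  | cons x t =>
    rw [PySem.List.min?_id_cons]
    simpa using gfold_some t x

theorem findSwapValues_spec : Claim_equal_findSwapValues := by
  intro array1 array2 _
  unfold Spec_findSwapValues findSwapValues findSwapValues_alt
  have hs1 : (PySem.List.sorted array1 (fun x => x) false).foldl (· + ·) (0 : Int)
      = array1.foldl (· + ·) 0 :=
    (PySem.List.sorted_perm array1 (fun x => x) false).foldl_eq 0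
  have hs2 : (PySem.List.sorted array2 (fun x => x) false).foldl (· + ·) (0 : Int)
      = array2.foldl (· + ·) 0 :=
    (PySem.List.sorted_perm array2 (fun x => x) false).foldl_eq 0
  simp only [hs1, hs2]
  set diff := array1.foldl (· + ·) (0 : Int) - array2.foldl (· + ·) 0 with hdiff
  by_cases hpar : PySem.Int.mod diff 2 ≠ 0
  · rw [if_pos hpar, if_pos hpar]
  · rw [if_neg hpar, if_neg hpar]
    set d := PySem.Int.floordiv diff 2 with hd
    -- the two membership predicates agree
    have hpp : ∀ x : Int,
        ((PySem.Dict.counter (PySem.List.sorted array2 (fun x => x) false)).contains (x - d))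
        = PySem.Set.contains (PySem.Set.ofList array2) (x - d) := by
      intro x
      rw [PySem.Dict.contains_counter]
      rw [Bool.eq_iff_iff]
      simp [PySem.List.mem_sorted, PySem.Set.contains,
        PySem.Set.mem_ofList]
    rw [findLoopA_eq]
    have hB := foldB_eq_min?
      (fun num => PySem.Set.contains (PySem.Set.ofList array2) (num - d)) array1
    rw [hB]
    have hfun : (fun x : Int =>
        (PySem.Dict.counter (PySem.List.sorted array2 (fun x => x) false)).contains (x - d))
        = fun num : Int => PySem.Set.contains (PySem.Set.ofList array2) (num - d) := by
      funext x; exact hpp x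
    rw [hfun]
    set p := fun num : Int => PySem.Set.contains (PySem.Set.ofList array2) (num - d) with hp
    -- compare first match in sorted array1 with the minimum of the filtered list
    cases hA : (PySem.List.sorted array1 (fun x => x) false).find? p with
    | none =>
      cases hBm : PySem.List.min? (array1.filter p) (fun y => y) with
      | none => rfl
      | some mB =>
        exfalso
        have hmem := PySem.List.min?_mem hBm
        have ⟨hmem1, hpB⟩ := List.mem_filter.mp hmem
        have := List.find?_eq_none.mp hA mB
          ((PySem.List.mem_sorted array1 (fun x => x) false mB).mpr hmem1)
        exact this hpB
    | some mA =>
      obtain ⟨hpA, hmemA, hminA⟩ := find?_sorted_min p _ mA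
        (PySem.List.sorted_pairwise array1 (fun x => x)) hA
      have hmemA1 := (PySem.List.mem_sorted array1 (fun x => x) false mA).mp hmemA
      cases hBm : PySem.List.min? (array1.filter p) (fun y => y) with
      | none =>
        exfalso
        have := (PySem.List.min?_eq_none_iff (array1.filter p) (fun y => y)).mp hBm
        have : mA ∈ array1.filter p := List.mem_filter.mpr ⟨hmemA1, hpA⟩
        simp_all
      | some mB =>
        have hmemB := PySem.List.min?_mem hBm
        have ⟨hmemB1, hpB⟩ := List.mem_filter.mp hmemB
        have h1 : mA ≤ mB := hminA mB
          ((PySem.List.mem_sorted array1 (fun x => x) false mB).mpr hmemB1) hpB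
        have h2 : mB ≤ mA := PySem.List.min?_isMin hBm mA
          (List.mem_filter.mpr ⟨hmemA1, hpA⟩)
        have : mA = mB := le_antisymm h1 h2
        simp [this]
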